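-- pv_equiv track=rewrite | github.com/saddeveloper99/coding_test_prac | week6/64061.py | solution
-- ===== SOURCE A (Python) =====
-- def solution(board, moves):
--     new_board = []
--     for i in range(len(board[0])):
--         arr = [board[j][i] for j in range(len(board[0])) if board[j][i]]
--         arr.reverse()
--         new_board.append(arr)
--
--     result = []
--     answer = 0
--     for i in moves:
--         if new_board[i-1]:
--             if not result or new_board[i-1][-1] != result[-1]:
--                 result.append(new_board[i-1].pop())
--             else:
--                 new_board[i-1].pop()
--                 result.pop()
--                 answer += 2
--     return answer
-- ===== SOURCE B (Python) =====
-- def solution(board, moves):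
--     n = len(board[0])
--     top = [0] * n          # per column: row index of the next candidate doll
--     result = []
--     answer = 0
--     for m in moves:
--         c = m - 1
--         t = top[c]
--         while t < n and board[t][c] == 0:
--             t += 1
--         if t < n:
--             v = board[t][c]
--             top[c] = t + 1
--             if result and result[-1] == v:
--                 result.pop()
--                 answer += 2
--             else:
--                 result.append(v)
--         else:
--             top[c] = t
--     return answer
-- ===== Notes on version B (the rewrite author's own statement) =====
-- stated objective: alternative
-- what changed: B builds no per-column reversed stack lists; it keeps one top-of-column row pointer per column and reads the current doll by indexing the original grid, skipping zero cells lazily while processing the moves.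
-- outside the precondition, e.g. on solution([[5, 2], [3, 4, 2]], [2, 0]): A returns 0, B returns 2
import Mathlib
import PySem

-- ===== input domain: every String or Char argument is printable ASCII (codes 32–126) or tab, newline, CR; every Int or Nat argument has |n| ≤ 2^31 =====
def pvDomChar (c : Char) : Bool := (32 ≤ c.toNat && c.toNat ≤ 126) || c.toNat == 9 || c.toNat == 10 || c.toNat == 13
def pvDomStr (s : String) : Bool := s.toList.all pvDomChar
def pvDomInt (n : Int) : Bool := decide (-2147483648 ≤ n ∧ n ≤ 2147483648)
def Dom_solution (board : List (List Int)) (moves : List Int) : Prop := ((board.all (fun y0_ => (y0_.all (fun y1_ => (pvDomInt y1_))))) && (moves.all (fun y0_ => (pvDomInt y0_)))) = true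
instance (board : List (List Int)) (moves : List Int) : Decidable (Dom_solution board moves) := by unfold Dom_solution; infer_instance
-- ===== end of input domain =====

-- B replaces A's per-column reversed stack lists by a top-row pointer per column that indexes
-- the original grid, skipping zero cells lazily during the moves (objective: alternative).

-- board[j][c] read with default 0 (in range under Pre_); shared cell accessor of both ports
def pvCell (board : List (List Int)) (j : Int) (c : Int) : Int :=
  PySem.List.pyGetD (PySem.List.pyGetD board j []) c 0

-- ===== PORT A =====
-- one iteration of A's `for i in moves` loop over state (new_board, result, answer)
def pvStepA (st : List (List Int) × List Int × Int) (m : Int) : List (List Int) × List Int × Int :=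
  let nb := st.1; let res := st.2.1; let ans := st.2.2
  let stack := PySem.List.pyGetD nb (m - 1) []
  if stack ≠ [] then
    if res = [] ∨ PySem.List.pyGetD stack (-1) 0 ≠ PySem.List.pyGetD res (-1) 0 then
      (PySem.List.pySetD nb (m - 1) stack.dropLast, res ++ [PySem.List.pyGetD stack (-1) 0], ans)
    else
      (PySem.List.pySetD nb (m - 1) stack.dropLast, res.dropLast, ans + 2)
  else st

def solution (board : List (List Int)) (moves : List Int) : Int :=
  let n := (PySem.List.pyGetD board 0 []).length
  let newBoard := (List.range n).map (fun (i : Nat) =>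
    ((List.range n).filterMap (fun (j : Nat) =>
      let v := pvCell board (j : Int) (i : Int)
      if v ≠ 0 then some v else none)).reverse)
  (moves.foldl pvStepA (newBoard, ([], 0))).2.2

-- ===== PORT B =====
-- the `while t < n and board[t][c] == 0: t += 1` loop of B
def pvSkip (board : List (List Int)) (c : Int) (n : Nat) (t : Nat) : Nat :=
  if t < n then
    if pvCell board (t : Int) c = 0 then pvSkip board c n (t + 1) else t
  else t
termination_by n - t

-- one iteration of B's `for m in moves` loop over state (top, result, answer)
def pvStepB (board : List (List Int)) (n : Nat) (st : List Nat × List Int × Int) (m : Int) :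
    List Nat × List Int × Int :=
  let top := st.1; let res := st.2.1; let ans := st.2.2
  let t := pvSkip board (m - 1) n (PySem.List.pyGetD top (m - 1) 0)
  if t < n then
    let v := pvCell board (t : Int) (m - 1)
    let top' := PySem.List.pySetD top (m - 1) (t + 1)
    if res ≠ [] ∧ PySem.List.pyGetD res (-1) 0 = v then (top', res.dropLast, ans + 2)
    else (top', res ++ [v], ans)
  else (PySem.List.pySetD top (m - 1) t, res, ans)

def solution_alt (board : List (List Int)) (moves : List Int) : Int :=
  let n := (PySem.List.pyGetD board 0 []).length
  (moves.foldl (pvStepB board n) (List.replicate n 0, ([], 0))).2.2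

-- ===== PRECONDITION & SPEC =====
-- Pre_ excludes inputs where A raises (empty board, fewer or shorter rows than n = len(board[0]),
-- a move outside [1-n, n]) and, only when a non-positive move is present (which A resolves by
-- Python negative-index wraparound), boards whose first n rows are longer than n, where that
-- wraparound lands on a column that is an accident of A's square-board indexing.
def Pre_solution (board : List (List Int)) (moves : List Int) : Prop :=
  board ≠ [] ∧
  (PySem.List.pyGetD board 0 []).length ≤ board.length ∧
  (∀ row ∈ board.take (PySem.List.pyGetD board 0 []).length,
      (PySem.List.pyGetD board 0 []).length ≤ row.length) ∧
  (∀ m ∈ moves, 1 - ((PySem.List.pyGetD board 0 []).length : Int) ≤ m ∧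
      m ≤ ((PySem.List.pyGetD board 0 []).length : Int)) ∧
  ((∃ m ∈ moves, m ≤ 0) → ∀ row ∈ board.take (PySem.List.pyGetD board 0 []).length,
      row.length = (PySem.List.pyGetD board 0 []).length)

instance (board : List (List Int)) (moves : List Int) : Decidable (Pre_solution board moves) := by
  unfold Pre_solution; infer_instance

def pvWitness_solution : List (List Int) × List Int := ([[1, 2], [3, 1]], [1, 2, 2])

def Spec_solution (board : List (List Int)) (moves : List Int) (out : Int) : Prop := out = solution_alt board moves
instance (board : List (List Int)) (moves : List Int) (out : Int) : Decidable (Spec_solution board moves out) := by unfold Spec_solution; infer_instance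

-- ===== CLAIM (what is proved, stated in full; the proofs are below) =====
def Claim_equal_solution : Prop := ∀ (board : List (List Int)) (moves : List Int), Dom_solution board moves → Pre_solution board moves → Spec_solution board moves (solution board moves)

-- ===== LEMMAS AND PROOFS =====

-- remaining nonzero entries of column c from row t downwards, in top-to-bottom order
def gCol (board : List (List Int)) (n : Nat) (c : Int) (t : Nat) : List Int :=
  (((List.range n).drop t).map (fun (j : Nat) => pvCell board (j : Int) c)).filter (fun v => v ≠ 0)

-- relation between A's stack array and B's pointer array
def pvInv (board : List (List Int)) (n : Nat) (nb : List (List Int)) (top : List Nat) : Prop :=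
  nb.length = n ∧ top.length = n ∧
  ∀ c : Nat, c < n →
    top.getD c 0 ≤ n ∧ nb.getD c [] = (gCol board n (c : Int) (top.getD c 0)).reverse

theorem gCol_ge (board : List (List Int)) (n : Nat) (c : Int) (t : Nat) (h : n ≤ t) :
    gCol board n c t = [] := by
  simp [gCol, List.drop_eq_nil_of_le, h]

theorem gCol_succ (board : List (List Int)) (n : Nat) (c : Int) (t : Nat) (h : t < n) :
    gCol board n c t =
      (if pvCell board (t : Int) c ≠ 0 then [pvCell board (t : Int) c] else []) ++
        gCol board n c (t + 1) := by
  have hdrop : (List.range n).drop t = t :: (List.range n).drop (t + 1) := by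
    rw [List.drop_eq_getElem_cons (by simpa using h)]
    simp
  simp only [gCol, hdrop, List.map_cons, List.filter_cons]
  split_ifs with h1 h2 h2 <;> simp_all

theorem pvSkip_spec (board : List (List Int)) (c : Int) (n : Nat) : ∀ t : Nat, t ≤ n →
    gCol board n c (pvSkip board c n t) = gCol board n c t ∧
    t ≤ pvSkip board c n t ∧ pvSkip board c n t ≤ n ∧
    (pvSkip board c n t < n → pvCell board ((pvSkip board c n t : Nat) : Int) c ≠ 0) := by
  intro t
  induction t using pvSkip.induct board c n with
  | case1 t hlt hz ih =>
    intro _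
    rw [pvSkip, if_pos hlt, if_pos hz]
    obtain ⟨h1, h2, h3, h4⟩ := ih (by omega)
    refine ⟨?_, by omega, h3, h4⟩
    rw [h1, gCol_succ board n c t hlt]
    simp [hz]
  | case2 t hlt hz =>
    intro ht
    rw [pvSkip, if_pos hlt, if_neg hz]
    exact ⟨rfl, le_refl _, by omega, fun _ => hz⟩
  | case3 t hlt =>
    intro ht
    rw [pvSkip, if_neg hlt]
    exact ⟨rfl, le_refl _, ht, fun h => absurd h hlt⟩

theorem getD_set_self {α : Type} (xs : List α) (i : Nat) (v d : α) (h : i < xs.length) :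
    (xs.set i v).getD i d = v := by
  simp [List.getD, List.getElem?_set_self, h]

theorem getD_set_ne {α : Type} (xs : List α) (i j : Nat) (v d : α) (h : j ≠ i) :
    (xs.set i v).getD j d = xs.getD j d := by
  simp [List.getD]
  rw [List.getElem?_set_ne (Ne.symm h)]

theorem filterMap_eq_filter_map {α β : Type} (f : α → Option β) (g : α → β) (p : β → Bool)
    (h : ∀ x, f x = if p (g x) then some (g x) else none) (l : List α) :
    l.filterMap f = (l.map g).filter p := by
  induction l with
  | nil => rfl
  | cons x xs ih =>
    rw [List.filterMap_cons, List.map_cons, List.filter_cons, h x]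
    by_cases hp : p (g x) <;> simp [hp, ih]

theorem pyIdx_eq (n c : Nat) (i : Int) (hc : c < n)
    (hi : i = (c : Int) ∨ i = (c : Int) - (n : Int)) :
    PySem.List.pyIdx? n i = some c := by
  simp only [PySem.List.pyIdx?]
  rcases hi with h | h <;> subst h
  · rw [if_pos (by omega), if_pos (by push_cast; omega)]
    simp
  · rw [if_neg (by omega), if_pos (by omega)]
    congr 1
    omega

theorem pyGetD_idx {α : Type} (xs : List α) (i : Int) (n c : Nat) (hlen : xs.length = n)
    (hc : c < n) (hi : i = (c : Int) ∨ i = (c : Int) - (n : Int)) (d : α) :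
    PySem.List.pyGetD xs i d = xs.getD c d := by
  rw [show PySem.List.pyGetD xs i d =
        ((PySem.List.pyIdx? xs.length i).bind (fun k => xs[k]?)).getD d from rfl,
      hlen, pyIdx_eq n c i hc hi]
  rfl

theorem pySetD_idx {α : Type} (xs : List α) (i : Int) (n c : Nat) (hlen : xs.length = n)
    (hc : c < n) (hi : i = (c : Int) ∨ i = (c : Int) - (n : Int)) (v : α) :
    PySem.List.pySetD xs i v = xs.set c v := by
  rw [show PySem.List.pySetD xs i v =
        ((PySem.List.pyIdx? xs.length i).map (fun k => xs.set k v)).getD xs from rfl,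
      hlen, pyIdx_eq n c i hc hi]
  rfl

theorem pvSkip_congr (board : List (List Int)) (i i' : Int) (n : Nat)
    (h : ∀ t : Nat, t < n → pvCell board (t : Int) i = pvCell board (t : Int) i') :
    ∀ t : Nat, pvSkip board i n t = pvSkip board i' n t := by
  intro t
  induction t using pvSkip.induct board i n with
  | case1 t hlt hz ih =>
    conv_lhs => rw [pvSkip.eq_def]
    conv_rhs => rw [pvSkip.eq_def]
    rw [if_pos hlt, if_pos hlt, if_pos hz,
        if_pos (show pvCell board (t : Int) i' = 0 by rw [← h t hlt]; exact hz), ih]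
  | case2 t hlt hz =>
    conv_lhs => rw [pvSkip.eq_def]
    conv_rhs => rw [pvSkip.eq_def]
    rw [if_pos hlt, if_pos hlt, if_neg hz,
        if_neg (show ¬ pvCell board (t : Int) i' = 0 by rw [← h t hlt]; exact hz)]
  | case3 t hlt =>
    conv_lhs => rw [pvSkip.eq_def]
    conv_rhs => rw [pvSkip.eq_def]
    rw [if_neg hlt, if_neg hlt]

theorem step_eq (board : List (List Int)) (n : Nat) (nb : List (List Int)) (top : List Nat)
    (res : List Int) (ans : Int) (m : Int) (c : Nat) (hInv : pvInv board n nb top)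
    (hcn : c < n) (hi : m - 1 = (c : Int) ∨ m - 1 = (c : Int) - (n : Int))
    (hcell : ∀ t : Nat, t < n → pvCell board (t : Int) (m - 1) = pvCell board (t : Int) (c : Int)) :
    (pvStepA (nb, res, ans) m).2 = (pvStepB board n (top, res, ans) m).2 ∧
    pvInv board n (pvStepA (nb, res, ans) m).1 (pvStepB board n (top, res, ans) m).1 := by
  obtain ⟨hlen, htlen, hc⟩ := hInv
  obtain ⟨ht0n, hstack⟩ := hc c hcn
  set t0 := top.getD c 0 with ht0def
  obtain ⟨hskip, hle1, hle2, hnz⟩ := pvSkip_spec board (c : Int) n t0 ht0n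
  set t := pvSkip board (c : Int) n t0 with htdef
  have unfoldA : pvStepA (nb, res, ans) m =
      (if nb.getD c [] ≠ [] then
         if res = [] ∨ PySem.List.pyGetD (nb.getD c []) (-1) 0 ≠ PySem.List.pyGetD res (-1) 0 then
           (nb.set c (nb.getD c []).dropLast, res ++ [PySem.List.pyGetD (nb.getD c []) (-1) 0], ans)
         else (nb.set c (nb.getD c []).dropLast, res.dropLast, ans + 2)
       else (nb, res, ans)) := by
    simp only [pvStepA, pyGetD_idx nb (m - 1) n c hlen hcn hi,
      pySetD_idx nb (m - 1) n c hlen hcn hi]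
  have unfoldB : pvStepB board n (top, res, ans) m =
      (if t < n then
         if res ≠ [] ∧ PySem.List.pyGetD res (-1) 0 = pvCell board (t : Int) (m - 1) then
           (top.set c (t + 1), res.dropLast, ans + 2)
         else (top.set c (t + 1), res ++ [pvCell board (t : Int) (m - 1)], ans)
       else (top.set c t, res, ans)) := by
    simp only [pvStepB, pyGetD_idx top (m - 1) n c htlen hcn hi,
      pySetD_idx top (m - 1) n c htlen hcn hi,
      pvSkip_congr board (m - 1) (c : Int) n (fun t ht => hcell t ht)]
    rfl
  by_cases htn : t < n
  · -- a doll is picked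
    rw [hcell t htn] at unfoldB
    have hv : pvCell board (t : Int) (c : Int) ≠ 0 := hnz htn
    set v := pvCell board (t : Int) (c : Int) with hvdef
    have hsplit : gCol board n (c : Int) t0 = v :: gCol board n (c : Int) (t + 1) := by
      rw [← hskip, gCol_succ board n (c : Int) t htn, if_pos hv]
      rfl
    have hstack' : nb.getD c [] = (gCol board n (c : Int) (t + 1)).reverse ++ [v] := by
      rw [hstack, hsplit, List.reverse_cons]
    have hne : nb.getD c [] ≠ [] := by rw [hstack']; simp
    have hlast : PySem.List.pyGetD (nb.getD c []) (-1) 0 = v := by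
      rw [hstack', PySem.List.pyGetD_neg_one_append_singleton]
    have hdrop : (nb.getD c []).dropLast = (gCol board n (c : Int) (t + 1)).reverse := by
      rw [hstack']; simp
    have hInv' : pvInv board n (nb.set c (nb.getD c []).dropLast) (top.set c (t + 1)) := by
      refine ⟨by simpa using hlen, by simpa using htlen, ?_⟩
      intro c' hc'
      by_cases hcc : c' = c
      · rw [hcc, getD_set_self top c (t + 1) 0 (by omega), getD_set_self nb c _ [] (by omega)]
        exact ⟨by omega, hdrop⟩
      · rw [getD_set_ne top c c' (t + 1) 0 hcc, getD_set_ne nb c c' _ [] hcc]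
        exact hc c' hc'
    by_cases hres : res ≠ [] ∧ PySem.List.pyGetD res (-1) 0 = v
    · have hA : pvStepA (nb, res, ans) m = (nb.set c (nb.getD c []).dropLast, res.dropLast, ans + 2) := by
        rw [unfoldA]
        simp only [if_pos hne]
        rw [if_neg (by rw [hlast]; push_neg; exact ⟨hres.1, hres.2.symm⟩)]
      have hB : pvStepB board n (top, res, ans) m = (top.set c (t + 1), res.dropLast, ans + 2) := by
        rw [unfoldB, if_pos htn, if_pos hres]
      rw [hA, hB]
      exact ⟨rfl, hInv'⟩
    · have hcond : res = [] ∨ PySem.List.pyGetD (nb.getD c []) (-1) 0 ≠ PySem.List.pyGetD res (-1) 0 := by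
        rw [hlast]
        by_cases h0 : res = []
        · exact Or.inl h0
        · push_neg at hres
          exact Or.inr (fun hh => (hres h0) hh.symm)
      have hA : pvStepA (nb, res, ans) m = (nb.set c (nb.getD c []).dropLast, res ++ [v], ans) := by
        rw [unfoldA]
        simp only [if_pos hne]
        rw [if_pos hcond, hlast]
      have hB : pvStepB board n (top, res, ans) m = (top.set c (t + 1), res ++ [v], ans) := by
        rw [unfoldB, if_pos htn, if_neg hres]
      rw [hA, hB]
      exact ⟨rfl, hInv'⟩
  · -- column exhausted
    have htn' : t = n := by omega
    have hempty : nb.getD c [] = [] := by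
      rw [hstack, ← hskip, htn', gCol_ge board n (c : Int) n (le_refl n)]
      rfl
    have hA : pvStepA (nb, res, ans) m = (nb, res, ans) := by
      rw [unfoldA, hempty]
      simp
    have hB : pvStepB board n (top, res, ans) m = (top.set c t, res, ans) := by
      rw [unfoldB, if_neg htn]
    rw [hA, hB]
    refine ⟨rfl, hlen, by simpa using htlen, ?_⟩
    intro c' hc'
    by_cases hcc : c' = c
    · rw [hcc, getD_set_self top c t 0 (by omega)]
      refine ⟨by omega, ?_⟩
      rw [hempty, htn', gCol_ge board n _ n (le_refl n)]
      rfl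
    · rw [getD_set_ne top c c' t 0 hcc]
      exact hc c' hc'

theorem loop_eq (board : List (List Int)) (n : Nat) : ∀ (ms : List Int)
    (nb : List (List Int)) (top : List Nat) (res : List Int) (ans : Int),
    pvInv board n nb top →
    (∀ m ∈ ms, ∃ c : Nat, c < n ∧ (m - 1 = (c : Int) ∨ m - 1 = (c : Int) - (n : Int)) ∧
      ∀ t : Nat, t < n → pvCell board (t : Int) (m - 1) = pvCell board (t : Int) (c : Int)) →
    (ms.foldl pvStepA (nb, res, ans)).2 = (ms.foldl (pvStepB board n) (top, res, ans)).2 := by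
  intro ms
  induction ms with
  | nil => intro nb top res ans hInv _; rfl
  | cons m ms ih =>
    intro nb top res ans hInv hms
    obtain ⟨c, hcn, hi, hcell⟩ := hms m (List.mem_cons_self)
    obtain ⟨heq, hInv'⟩ := step_eq board n nb top res ans m c hInv hcn hi hcell
    simp only [List.foldl_cons]
    rw [show pvStepA (nb, res, ans) m =
          ((pvStepA (nb, res, ans) m).1, (pvStepA (nb, res, ans) m).2) from rfl,
        show pvStepB board n (top, res, ans) m =
          ((pvStepB board n (top, res, ans) m).1, (pvStepB board n (top, res, ans) m).2) from rfl,
        ← heq]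
    exact ih (pvStepA (nb, res, ans) m).1 (pvStepB board n (top, res, ans) m).1
      (pvStepA (nb, res, ans) m).2.1 (pvStepA (nb, res, ans) m).2.2 hInv'
      (fun x hx => hms x (List.mem_cons_of_mem m hx))

theorem init_inv (board : List (List Int)) (n : Nat) :
    pvInv board n
      ((List.range n).map (fun (i : Nat) =>
        ((List.range n).filterMap (fun (j : Nat) =>
          let v := pvCell board (j : Int) (i : Int)
          if v ≠ 0 then some v else none)).reverse))
      (List.replicate n 0) := by
  refine ⟨by simp, by simp, ?_⟩
  intro c hcn
  constructor
  · simp [List.getD, List.getElem?_replicate, hcn]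
  · have h1 : (List.replicate n (0 : Nat)).getD c 0 = 0 := by
      simp [List.getD, List.getElem?_replicate, hcn]
    rw [h1]
    have h2 : ((List.range n).map (fun (i : Nat) =>
        ((List.range n).filterMap (fun (j : Nat) =>
          let v := pvCell board (j : Int) (i : Int)
          if v ≠ 0 then some v else none)).reverse)).getD c [] =
        ((List.range n).filterMap (fun (j : Nat) =>
          let v := pvCell board (j : Int) (c : Int)
          if v ≠ 0 then some v else none)).reverse := by
      simp [List.getD, List.getElem?_map, List.getElem?_range, hcn]
    rw [h2, filterMap_eq_filter_map
      (fun (j : Nat) => let v := pvCell board (j : Int) (c : Int); if v ≠ 0 then some v else none)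
      (fun (j : Nat) => pvCell board (j : Int) (c : Int)) (fun v => v ≠ 0)
      (fun x => by by_cases h0 : pvCell board (x : Int) (c : Int) = 0 <;> simp [h0])]
    simp [gCol]

-- ===== VERDICT (by name: the statement is the Claim_ definition above) =====
theorem solution_spec : Claim_equal_solution := by
  intro board moves _ hPre
  obtain ⟨_, hrows, _, hrange, hsq⟩ := hPre
  have hmoves : ∀ m ∈ moves, ∃ c : Nat, c < (PySem.List.pyGetD board 0 []).length ∧
      (m - 1 = (c : Int) ∨ m - 1 = (c : Int) - ((PySem.List.pyGetD board 0 []).length : Int)) ∧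
      ∀ t : Nat, t < (PySem.List.pyGetD board 0 []).length →
        pvCell board (t : Int) (m - 1) =
          pvCell board (t : Int) ((c : Nat) : Int) := by
    intro m hm
    obtain ⟨h1, h2⟩ := hrange m hm
    by_cases hpos : 1 ≤ m
    · refine ⟨(m - 1).toNat, by omega, Or.inl (by omega), ?_⟩
      intro t ht
      have hmc : m - 1 = (((m - 1).toNat : Nat) : Int) := by omega
      conv_lhs => rw [hmc]
    · have hsq' := hsq ⟨m, hm, by omega⟩
      refine ⟨(m - 1 + (PySem.List.pyGetD board 0 []).length).toNat, by omega,
        Or.inr (by omega), ?_⟩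
      intro t ht
      have hrlen : (PySem.List.pyGetD board (t : Int) []).length =
          (PySem.List.pyGetD board 0 []).length := by
        rw [PySem.List.pyGetD_natCast]
        have htb : t < board.length := by omega
        have hmem : board.getD t [] ∈ board.take (PySem.List.pyGetD board 0 []).length := by
          have : board.getD t [] = (board.take (PySem.List.pyGetD board 0 []).length)[t]'
              (by simp [List.length_take]; omega) := by
            simp [List.getD, List.getElem?_eq_getElem htb, List.getElem_take]
          rw [this]
          exact List.getElem_mem _
        exact hsq' _ hmem
      unfold pvCell
      rw [pyGetD_idx (PySem.List.pyGetD board (t : Int) []) (m - 1)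
            (PySem.List.pyGetD board 0 []).length
            (m - 1 + (PySem.List.pyGetD board 0 []).length).toNat hrlen (by omega)
            (Or.inr (by omega)) 0]
      simp only [PySem.List.pyGetD_natCast]
  have h := loop_eq board (PySem.List.pyGetD board 0 []).length moves
      ((List.range (PySem.List.pyGetD board 0 []).length).map (fun (i : Nat) =>
        ((List.range (PySem.List.pyGetD board 0 []).length).filterMap (fun (j : Nat) =>
          let v := pvCell board (j : Int) (i : Int)
          if v ≠ 0 then some v else none)).reverse))
      (List.replicate (PySem.List.pyGetD board 0 []).length 0) [] 0
      (init_inv board _) hmoves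
  unfold Spec_solution
  exact congrArg Prod.snd h
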